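-- pv_equiv track=rewrite | github.com/hoonr-ai/airecruiter | apps/api/services/job_rubric_db.py | _parse_customer_requirement
-- ===== SOURCE A (Python) =====
-- from typing import List, Dict, Optional
--
-- def _parse_customer_requirement(requirement: str) -> Dict[str, str]:
--     requirement = (requirement or "").strip()
--     known_prefixes = [
--         "Must not be employed by",
--         "Currently employed by",
--         "Previously employed by",
--     ]
--
--     for prefix in known_prefixes:
--         marker = f"{prefix}:"
--         if requirement.startswith(marker):
--             return {
--                 "type": prefix,
--                 "value": requirement[len(marker):].strip(),
--             }
--
--     return {
--         "type": "Must not be employed by",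
--         "value": requirement,
--     }
-- ===== SOURCE B (Python) =====
-- def _parse_customer_requirement(requirement):
--     requirement = (requirement or "").strip()
--     head, sep, rest = requirement.partition(":")
--     if sep and head in {"Must not be employed by",
--                         "Currently employed by",
--                         "Previously employed by"}:
--         return {"type": head, "value": rest.strip()}
--     return {"type": "Must not be employed by", "value": requirement}
-- ===== Notes on version B (the rewrite author's own statement) =====
-- stated objective: idiomatic
-- what changed: Replaces the loop of repeated startswith scans over the three known prefixes by a single partition at the first colon separator followed by one set-membership test of the head.
import Mathlib
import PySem

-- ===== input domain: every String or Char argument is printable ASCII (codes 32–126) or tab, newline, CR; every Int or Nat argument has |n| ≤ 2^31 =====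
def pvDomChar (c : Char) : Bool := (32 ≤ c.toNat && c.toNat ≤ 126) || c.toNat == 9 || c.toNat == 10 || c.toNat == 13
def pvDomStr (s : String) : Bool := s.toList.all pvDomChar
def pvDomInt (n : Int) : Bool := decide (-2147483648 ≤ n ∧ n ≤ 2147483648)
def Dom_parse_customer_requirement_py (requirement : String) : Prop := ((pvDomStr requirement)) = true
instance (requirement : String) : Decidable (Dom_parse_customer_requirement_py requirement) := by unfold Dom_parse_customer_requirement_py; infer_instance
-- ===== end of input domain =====

-- B replaces A's loop of startswith tests over the three prefixes by one partition at the
-- first ':' and a single membership test of the head (more idiomatic, single scan).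


-- ===== PORT A =====
-- the for-loop over known_prefixes with early return, as structural recursion over that list
def pvALoop (r : String) : List String → List (String × String)
  | [] => [("type", "Must not be employed by"), ("value", r)]
  | p :: ps =>
      let marker := p ++ ":"
      if PySem.Str.startswith r marker then
        [("type", p), ("value", PySem.Str.strip (PySem.Str.slice r (some (PySem.Str.len marker)) none))]
      else pvALoop r ps

def parse_customer_requirement_py (requirement : String) : List (String × String) :=
  let r := PySem.Str.strip requirement
  pvALoop r ["Must not be employed by", "Currently employed by", "Previously employed by"]

-- ===== PORT B =====
-- str.partition(":") ported by hand over the character list (exact: splits at the FIRST ':';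
-- the Bool is whether the separator was found, i.e. sep ≠ "")
def pvPartition : List Char → List Char × Bool × List Char
  | [] => ([], false, [])
  | c :: cs =>
      if c = ':' then ([], true, cs)
      else
        let r := pvPartition cs
        (c :: r.1, r.2.1, r.2.2)

def parse_customer_requirement_py_alt (requirement : String) : List (String × String) :=
  let r := PySem.Str.strip requirement
  let pr := pvPartition r.toList
  let head := String.ofList pr.1
  if pr.2.1 && ["Must not be employed by", "Currently employed by", "Previously employed by"].contains head then
    [("type", head), ("value", PySem.Str.strip (String.ofList pr.2.2))]
  else
    [("type", "Must not be employed by"), ("value", r)]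

-- ===== PRECONDITION & SPEC =====
def Spec_parse_customer_requirement_py (requirement : String) (out : List (String × String)) : Prop := out = parse_customer_requirement_py_alt requirement
instance (requirement : String) (out : List (String × String)) : Decidable (Spec_parse_customer_requirement_py requirement out) := by unfold Spec_parse_customer_requirement_py; infer_instance

-- ===== CLAIM (what is proved, stated in full; the proofs are below) =====
def Claim_equal_parse_customer_requirement_py : Prop := ∀ (requirement : String), Dom_parse_customer_requirement_py requirement → Spec_parse_customer_requirement_py requirement (parse_customer_requirement_py requirement)

-- ===== LEMMAS AND PROOFS =====

-- pvPartition really splits at the first ':' (or finds none)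
theorem pvPartition_nil : pvPartition [] = ([], false, []) := rfl

theorem pvPartition_cons (c : Char) (cs : List Char) :
    pvPartition (c :: cs) =
      if c = ':' then ([], true, cs)
      else (c :: (pvPartition cs).1, (pvPartition cs).2.1, (pvPartition cs).2.2) := rfl

theorem pvPartition_spec (cs : List Char) :
    ':' ∉ (pvPartition cs).1 ∧
      (if (pvPartition cs).2.1 then cs = (pvPartition cs).1 ++ ':' :: (pvPartition cs).2.2
       else cs = (pvPartition cs).1 ∧ (pvPartition cs).2.2 = []) := by
  induction cs with
  | nil => simp [pvPartition_nil]
  | cons c cs ih =>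
    obtain ⟨ih1, ih2⟩ := ih
    by_cases hc : c = ':'
    · subst hc
      rw [pvPartition_cons, if_pos rfl]
      simp
    · rw [pvPartition_cons, if_neg hc]
      refine ⟨by simp [Ne.symm hc, ih1], ?_⟩
      cases hf : (pvPartition cs).2.1 with
      | true =>
        simp only [hf, if_true] at ih2 ⊢
        conv_lhs => rw [ih2]
        simp
      | false =>
        simp only [hf] at ih2 ⊢
        exact ⟨by rw [← ih2.1], ih2.2⟩

-- two colon-free heads followed by ':' split a list uniquely
theorem pvSplit_unique : ∀ (p h a b : List Char), ':' ∉ p → ':' ∉ h →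
    p ++ ':' :: a = h ++ ':' :: b → p = h ∧ a = b := by
  intro p
  induction p with
  | nil =>
    intro h a b _ hh he
    cases h with
    | nil => simpa using he
    | cons c h' =>
      simp at he
      exact absurd (he.1 ▸ List.mem_cons_self) hh
  | cons c p' ih =>
    intro h a b hp hh he
    cases h with
    | nil =>
      simp at he
      exact absurd (he.1 ▸ List.mem_cons_self) hp
    | cons d h' =>
      simp at he
      obtain ⟨rfl, he2⟩ := he
      have := ih h' a b (fun m => hp (List.mem_cons_of_mem _ m)) (fun m => hh (List.mem_cons_of_mem _ m)) he2
      simp [this.1, this.2]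

-- A's startswith test, characterised through B's partition
theorem pvStarts_iff (r : String) (p : String) (hp : ':' ∉ p.toList) :
    PySem.Str.startswith r (p ++ ":") = true ↔
      (pvPartition r.toList).2.1 = true ∧ (pvPartition r.toList).1 = p.toList := by
  obtain ⟨h1, h2⟩ := pvPartition_spec r.toList
  rw [PySem.Str.startswith_eq, PySem.Chars.startswith_iff]
  have htl : (p ++ ":").toList = p.toList ++ [':'] := by simp
  rw [htl]
  constructor
  · rintro ⟨u, hu⟩
    cases hf : (pvPartition r.toList).2.1 with
    | false =>
      simp [hf] at h2
      exfalso
      apply h1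
      rw [← h2.1, ← hu]
      simp
    | true =>
      simp [hf] at h2
      have : p.toList ++ ':' :: u = (pvPartition r.toList).1 ++ ':' :: (pvPartition r.toList).2.2 := by
        rw [← h2, ← hu]; simp
      have := pvSplit_unique _ _ _ _ hp h1 this
      exact ⟨rfl, this.1.symm⟩
  · rintro ⟨hf, hh⟩
    simp [hf] at h2
    rw [h2, hh]
    exact ⟨(pvPartition r.toList).2.2, by simp⟩

-- when the separator is found and the head is the prefix, A's slice is B's tail
theorem pvSlice_eq (r p : String) (hf : (pvPartition r.toList).2.1 = true)
    (hh : (pvPartition r.toList).1 = p.toList) :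
    PySem.Str.slice r (some (PySem.Str.len (p ++ ":"))) none = String.ofList (pvPartition r.toList).2.2 := by
  obtain ⟨_, h2⟩ := pvPartition_spec r.toList
  simp [hf] at h2
  apply String.toList_injective
  rw [PySem.Str.toList_slice]
  have hlen : PySem.Str.len (p ++ ":") = ((p.toList.length + 1 : Nat) : Int) := by
    simp [PySem.Str.len]
  rw [hh] at h2
  rw [hlen, PySem.Chars.slice_eq_listSlice, PySem.List.slice_from_natCast]
  conv_lhs => rw [h2]
  rw [show p.toList ++ ':' :: (pvPartition r.toList).2.2
        = (p.toList ++ [':']) ++ (pvPartition r.toList).2.2 by simp,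
      show p.toList.length + 1 = (p.toList ++ [':']).length by simp,
      List.drop_left]
  simp

-- ===== VERDICT (by name: the statement is the Claim_ definition above) =====
theorem parse_customer_requirement_py_spec : Claim_equal_parse_customer_requirement_py := by
  intro requirement _
  unfold Spec_parse_customer_requirement_py parse_customer_requirement_py parse_customer_requirement_py_alt
  set r := PySem.Str.strip requirement with hr
  simp only [pvALoop]
  have p1 : ':' ∉ ("Must not be employed by" : String).toList := by decide
  have p2 : ':' ∉ ("Currently employed by" : String).toList := by decide
  have p3 : ':' ∉ ("Previously employed by" : String).toList := by decide
  by_cases c1 : PySem.Str.startswith r ("Must not be employed by" ++ ":") = true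
  · obtain ⟨hf, hh⟩ := (pvStarts_iff r _ p1).mp c1
    have hcond : ((pvPartition r.toList).2.1 &&
        ["Must not be employed by", "Currently employed by", "Previously employed by"].contains
          (String.ofList (pvPartition r.toList).1)) = true := by rw [hf, hh]; simp
    rw [if_pos c1, if_pos hcond, hh, pvSlice_eq r _ hf hh]
    simp
  by_cases c2 : PySem.Str.startswith r ("Currently employed by" ++ ":") = true
  · obtain ⟨hf, hh⟩ := (pvStarts_iff r _ p2).mp c2
    have hcond : ((pvPartition r.toList).2.1 &&
        ["Must not be employed by", "Currently employed by", "Previously employed by"].contains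
          (String.ofList (pvPartition r.toList).1)) = true := by rw [hf, hh]; simp
    rw [if_neg c1, if_pos c2, if_pos hcond, hh, pvSlice_eq r _ hf hh]
    simp
  by_cases c3 : PySem.Str.startswith r ("Previously employed by" ++ ":") = true
  · obtain ⟨hf, hh⟩ := (pvStarts_iff r _ p3).mp c3
    have hcond : ((pvPartition r.toList).2.1 &&
        ["Must not be employed by", "Currently employed by", "Previously employed by"].contains
          (String.ofList (pvPartition r.toList).1)) = true := by rw [hf, hh]; simp
    rw [if_neg c1, if_neg c2, if_pos c3, if_pos hcond, hh, pvSlice_eq r _ hf hh]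
    simp
  -- no prefix matched: B's condition is also false
  · have hb : ((pvPartition r.toList).2.1 &&
        ["Must not be employed by", "Currently employed by", "Previously employed by"].contains
          (String.ofList (pvPartition r.toList).1)) = false := by
      cases hf : (pvPartition r.toList).2.1 with
      | false => simp
      | true =>
        simp only [Bool.true_and, List.contains_eq_mem, decide_eq_false_iff_not]
        intro hmem
        simp only [List.mem_cons, List.not_mem_nil, or_false] at hmem
        rcases hmem with h | h | h
        · exact c1 ((pvStarts_iff r _ p1).mpr ⟨hf, by rw [← h]; simp⟩)
        · exact c2 ((pvStarts_iff r _ p2).mpr ⟨hf, by rw [← h]; simp⟩)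
        · exact c3 ((pvStarts_iff r _ p3).mpr ⟨hf, by rw [← h]; simp⟩)
    rw [if_neg c1, if_neg c2, if_neg c3, if_neg (by rw [hb]; simp)]
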